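-- pv_equiv track=rewrite | github.com/plastic-labs/honcho | scripts/update_version.py | _clean_changelog_sections
-- ===== SOURCE A (Python) =====
-- def _clean_changelog_sections(changelog: str) -> str:
--     """Remove empty changelog sections."""
--     sections = ["Added", "Changed", "Fixed", "Deprecated", "Removed", "Security"]
--     lines = changelog.split("\n")
--     cleaned_lines = []
--     current_section = None
--     section_has_content = False
--     section_start_idx = -1
--     for i, line in enumerate(lines):
--         # Check if this is a section header
--         is_section_header = False
--         for section in sections:
--             if line.strip() == f"### {section}":
--                 # If we have a previous section, decide whether to keep it
--                 if (
--                     current_section is not None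
--                     and section_start_idx != -1
--                     and section_has_content
--                 ):
--                     # Keep the section
--                     cleaned_lines.extend(lines[section_start_idx:i])
--                 # Start tracking new section
--                 current_section = section
--                 section_start_idx = i
--                 section_has_content = False
--                 is_section_header = True
--                 break
--
--         if (
--             not is_section_header
--             and current_section is not None
--             and line.strip()
--             and not line.strip().startswith("#")
--         ):
--             section_has_content = True
--
--     # Handle the last section
--     if (
--         current_section is not None
--         and section_start_idx != -1
--         and section_has_content
--     ):
--         cleaned_lines.extend(lines[section_start_idx:])
--
--     # If no sections were found, return original
--     if not cleaned_lines and "###" not in changelog: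
--         return changelog
--
--     return "\n".join(cleaned_lines).strip()
-- ===== SOURCE B (Python) =====
-- def _clean_changelog_sections(changelog: str) -> str:
--     """Remove empty changelog sections (group-based two-phase rewrite)."""
--     headers = {f"### {s}" for s in ["Added", "Changed", "Fixed", "Deprecated", "Removed", "Security"]}
--
--     # Phase 1: split the lines into header-led groups; lines before the first header are dropped.
--     groups = []
--     for line in changelog.split("\n"):
--         if line.strip() in headers:
--             groups.append([line])
--         elif groups:
--             groups[-1].append(line)
--
--     # Phase 2: keep only groups that contain a real content line.
--     def has_content(group):
--         return any(l.strip() and not l.strip().startswith("#") for l in group)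
--
--     cleaned_lines = [l for g in groups if has_content(g) for l in g]
--
--     if not cleaned_lines and "###" not in changelog:
--         return changelog
--     return "\n".join(cleaned_lines).strip()
-- ===== Notes on version B (the rewrite author's own statement) =====
-- stated objective: simpler
-- what changed: Replaces A's single stateful index-and-slice scan (current_section/section_has_content/section_start_idx bookkeeping with lines[start:i] extends) by a two-phase decomposition: split the lines into header-led groups, then keep the groups with a content line and flatten.
import Mathlib
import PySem

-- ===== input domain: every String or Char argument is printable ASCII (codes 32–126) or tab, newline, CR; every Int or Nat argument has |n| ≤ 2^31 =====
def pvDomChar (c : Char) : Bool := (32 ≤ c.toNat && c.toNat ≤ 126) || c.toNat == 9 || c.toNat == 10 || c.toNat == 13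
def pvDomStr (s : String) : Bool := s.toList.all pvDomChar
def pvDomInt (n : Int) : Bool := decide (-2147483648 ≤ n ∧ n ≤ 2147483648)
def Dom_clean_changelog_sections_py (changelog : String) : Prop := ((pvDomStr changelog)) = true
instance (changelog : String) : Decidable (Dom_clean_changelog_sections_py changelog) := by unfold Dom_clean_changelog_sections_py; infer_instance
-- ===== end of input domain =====

-- B replaces A's stateful index-and-slice scan by a two-phase decomposition (group lines at headers, filter, flatten); same result, simpler shape.

-- ===== PORT A =====
def pvSections : List String := ["Added", "Changed", "Fixed", "Deprecated", "Removed", "Security"]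

-- the inner 'for section in sections: if line.strip() == f"### {section}": …; break'
def pvHeaderA (line : List Char) : Option String :=
  pvSections.find? (fun s => PySem.Chars.strip line == "### ".toList ++ s.toList)

-- state: (cleaned_lines, current_section, section_has_content, section_start_idx)
def pvStepA (lines : List (List Char)) (st : List (List Char) × Option String × Bool × Int)
    (p : Int × List Char) : List (List Char) × Option String × Bool × Int :=
  let (cleaned, cur, hasContent, startIdx) := st
  let (i, line) := p
  match pvHeaderA line with
  | some s =>
      let cleaned' := if cur.isSome && startIdx != -1 && hasContent
        then cleaned ++ PySem.List.slice lines (some startIdx) (some i) else cleaned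
      (cleaned', some s, false, i)
  | none =>
      if cur.isSome && !(PySem.Chars.strip line).isEmpty
          && !(PySem.Chars.startswith (PySem.Chars.strip line) ['#'])
        then (cleaned, cur, true, startIdx) else st

def clean_changelog_sections_py (changelog : String) : String :=
  let lines := PySem.Chars.splitOn changelog.toList ['\n']
  let st := (PySem.List.enumerate lines 0).foldl (pvStepA lines) ([], none, false, -1)
  let cleaned := if st.2.1.isSome && st.2.2.2 != -1 && st.2.2.1
    then st.1 ++ PySem.List.slice lines (some st.2.2.2) none else st.1
  if cleaned.isEmpty && !(PySem.Chars.isIn "###".toList changelog.toList) then changelog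
  else String.ofList (PySem.Chars.strip (PySem.Chars.join ['\n'] cleaned))

-- ===== PORT B =====
def pvHeadersB : List (List Char) :=
  ["### Added".toList, "### Changed".toList, "### Fixed".toList,
   "### Deprecated".toList, "### Removed".toList, "### Security".toList]

def pvIsHeaderB (line : List Char) : Bool := pvHeadersB.contains (PySem.Chars.strip line)

-- 'if header: groups.append([line]) elif groups: groups[-1].append(line)'
def pvStepB (acc : List (List (List Char))) (line : List Char) : List (List (List Char)) :=
  if pvIsHeaderB line then acc ++ [[line]]
  else if acc.isEmpty then acc
  else acc.dropLast ++ [acc.getLastD [] ++ [line]]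

def pvHasContent (g : List (List Char)) : Bool :=
  g.any (fun l => !(PySem.Chars.strip l).isEmpty
    && !(PySem.Chars.startswith (PySem.Chars.strip l) ['#']))

def clean_changelog_sections_py_alt (changelog : String) : String :=
  let lines := PySem.Chars.splitOn changelog.toList ['\n']
  let groups := lines.foldl pvStepB []
  let cleaned := (groups.filter pvHasContent).flatMap id
  if cleaned.isEmpty && !(PySem.Chars.isIn "###".toList changelog.toList) then changelog
  else String.ofList (PySem.Chars.strip (PySem.Chars.join ['\n'] cleaned))

-- ===== PRECONDITION & SPEC =====
def Spec_clean_changelog_sections_py (changelog : String) (out : String) : Prop := out = clean_changelog_sections_py_alt changelog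
instance (changelog : String) (out : String) : Decidable (Spec_clean_changelog_sections_py changelog out) := by unfold Spec_clean_changelog_sections_py; infer_instance

-- ===== CLAIM (what is proved, stated in full; the proofs are below) =====
def Claim_equal_clean_changelog_sections_py : Prop := ∀ (changelog : String), Dom_clean_changelog_sections_py changelog → Spec_clean_changelog_sections_py changelog (clean_changelog_sections_py changelog)

-- ===== LEMMAS AND PROOFS =====

theorem headerA_isSome_iff (line : List Char) :
    (pvHeaderA line).isSome = pvIsHeaderB line := by
  have e : ∀ s : String, ("### ".toList ++ s.toList) = ("### " ++ s).toList := by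
    intro s; simp
  simp only [pvHeaderA, pvIsHeaderB, pvSections, pvHeadersB,
    List.contains_eq_mem, List.mem_cons, List.not_mem_nil, e]
  rw [Bool.eq_iff_iff]
  simp only [List.find?_isSome, List.mem_cons, List.not_mem_nil, decide_eq_true_eq]
  constructor
  · rintro ⟨s, hs, hp⟩
    rcases hs with rfl|rfl|rfl|rfl|rfl|rfl|h
    all_goals simp_all
  · intro h
    rcases h with h|h|h|h|h|h|h
    · exact ⟨"Added", by simp, by simp [h]⟩
    · exact ⟨"Changed", by simp, by simp [h]⟩
    · exact ⟨"Fixed", by simp, by simp [h]⟩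
    · exact ⟨"Deprecated", by simp, by simp [h]⟩
    · exact ⟨"Removed", by simp, by simp [h]⟩
    · exact ⟨"Security", by simp, by simp [h]⟩
    · exact absurd h not_false

theorem header_not_content (line : List Char) (s : String) (h : pvHeaderA line = some s) :
    (!(PySem.Chars.strip line).isEmpty
      && !(PySem.Chars.startswith (PySem.Chars.strip line) ['#'])) = false := by
  have hp := List.find?_some h
  simp only [beq_iff_eq] at hp
  rw [hp]
  have hs : PySem.Chars.startswith ('#' :: '#' :: '#' :: ' ' :: s.toList) ['#'] = true := by
    rw [PySem.Chars.startswith_iff]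
    exact ⟨'#' :: '#' :: ' ' :: s.toList, rfl⟩
  simp [hs]

def pvInv (lines : List (List Char)) (k : Nat) (C : List (List Char)) (cur : Option String)
    (hc : Bool) (jI : Int) (gs : List (List (List Char))) : Prop :=
  (C = [] ∧ cur = none ∧ hc = false ∧ jI = -1 ∧ gs = []) ∨
  (∃ (j : Nat) (gs' : List (List (List Char))), cur.isSome = true ∧ jI = (j : Int) ∧ j ≤ k ∧
    gs = gs' ++ [(lines.drop j).take (k - j)] ∧
    C = (gs'.filter pvHasContent).flatMap id ∧
    hc = pvHasContent ((lines.drop j).take (k - j)))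

theorem pvMain (lines : List (List Char)) (rest : List (List Char)) (k : Nat)
    (C : List (List Char)) (cur : Option String) (hc : Bool) (jI : Int)
    (gs : List (List (List Char)))
    (hrest : rest = lines.drop k) (hinv : pvInv lines k C cur hc jI gs) :
    (let st' := (PySem.List.enumerate rest (k : Int)).foldl (pvStepA lines) (C, cur, hc, jI)
     if st'.2.1.isSome && st'.2.2.2 != -1 && st'.2.2.1
       then st'.1 ++ PySem.List.slice lines (some st'.2.2.2) none else st'.1)
    = ((rest.foldl pvStepB gs).filter pvHasContent).flatMap id := by
  induction rest generalizing k C cur hc jI gs with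
  | nil =>
    simp only [PySem.List.enumerate_nil, List.foldl_nil]
    rcases hinv with ⟨rfl, rfl, rfl, rfl, rfl⟩ | ⟨j, gs', hs, rfl, hjk, rfl, rfl, rfl⟩
    · simp
    · have hlen : lines.length ≤ k := by
        have := hrest.symm
        rwa [List.drop_eq_nil_iff] at this
      have hpend : (lines.drop j).take (k - j) = lines.drop j := by
        apply List.take_of_length_le
        simp; omega
      have hne : (((j : Nat) : Int) != -1) = true := by
        simp [bne]
      rw [PySem.List.slice_from_natCast]
      simp only [hs, hne, hpend, Bool.true_and, Bool.and_true]
      cases hcv : pvHasContent (lines.drop j) <;>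
        simp [List.filter_append, List.flatMap_append, hcv]
  | cons line rest' IH =>
    have h0 : (lines.drop k)[0]? = some line := by rw [← hrest]; rfl
    rw [List.getElem?_drop] at h0
    have hr' : rest' = lines.drop (k + 1) := by
      have : lines.drop (k + 1) = (lines.drop k).drop 1 := by
        rw [List.drop_drop]
      rw [this, ← hrest]
      rfl
    rw [PySem.List.enumerate_cons, List.foldl_cons, List.foldl_cons]
    have hB := headerA_isSome_iff line
    simp only [pvStepA, pvStepB]
    cases h : pvHeaderA line with
    | some s0 =>
      rw [h] at hB
      rw [← hB]
      have hnc : pvHasContent [line] = false := by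
        simp [pvHasContent, header_not_content line s0 h]
      have hpend1 : (lines.drop k).take 1 = [line] := by
        rw [← hrest]
        rfl
      rcases hinv with ⟨rfl, rfl, rfl, rfl, rfl⟩ | ⟨j, gs', hs, rfl, hjk, rfl, rfl, rfl⟩
      · simp only [Option.isSome_none, Bool.false_and, if_neg (by simp : ¬ (false = true))]
        have hinv2 : pvInv lines (k+1) [] (some s0) false (k : Int) ([] ++ [[line]]) := by
          refine Or.inr ⟨k, [], rfl, rfl, by omega, ?_, by simp, ?_⟩
          · simp [hpend1]
          · simp [hpend1, hnc]
        have := IH (k+1) [] (some s0) false (k : Int) ([] ++ [[line]]) hr' hinv2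
        simpa using this
      · have hne : (((j : Nat) : Int) != -1) = true := by simp [bne]
        rw [PySem.List.slice_natCast]
        simp only [hs, hne, Bool.true_and, Bool.and_true]
        have harg : (if pvHasContent ((lines.drop j).take (k - j))
            then (gs'.filter pvHasContent).flatMap id ++ (lines.drop j).take (k - j)
            else (gs'.filter pvHasContent).flatMap id)
            = (((gs' ++ [(lines.drop j).take (k - j)]).filter pvHasContent).flatMap id) := by
          cases hcv : pvHasContent ((lines.drop j).take (k - j)) <;>
            simp [List.filter_append, List.flatMap_append, hcv]
        rw [harg]
        have hinv2 : pvInv lines (k+1) (((gs' ++ [(lines.drop j).take (k - j)]).filter pvHasContent).flatMap id)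
            (some s0) false (k : Int) ((gs' ++ [(lines.drop j).take (k - j)]) ++ [[line]]) := by
          refine Or.inr ⟨k, gs' ++ [(lines.drop j).take (k - j)], rfl, rfl, by omega, ?_, rfl, ?_⟩
          · simp [hpend1]
          · simp [hpend1, hnc]
        exact IH (k+1) _ (some s0) false (k : Int) _ hr' hinv2
    | none =>
      rw [h] at hB
      rcases hinv with ⟨rfl, rfl, rfl, rfl, rfl⟩ | ⟨j, gs', hs, rfl, hjk, rfl, rfl, rfl⟩
      · rw [← hB]
        simp only [Option.isSome_none, Bool.false_and, if_neg (by simp : ¬ (false = true)),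
          List.isEmpty_nil]
        exact IH (k+1) [] none false (-1) [] hr' (Or.inl ⟨rfl, rfl, rfl, rfl, rfl⟩)
      · rw [← hB]
        have hext : (lines.drop j).take (k + 1 - j) = (lines.drop j).take (k - j) ++ [line] := by
          have hjk' : k + 1 - j = (k - j) + 1 := by omega
          have hgd : (lines.drop j)[k - j]? = some line := by
            rw [List.getElem?_drop]
            have hjj : j + (k - j) = k := by omega
            rw [hjj]
            simpa using h0
          rw [hjk', List.take_add_one, hgd]
          rfl
        have hlast : (gs' ++ [(lines.drop j).take (k - j)]).getLastD [] = (lines.drop j).take (k - j) := by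
          simp
        have hdl : (gs' ++ [(lines.drop j).take (k - j)]).dropLast = gs' := by
          simp
        have hcond : pvHasContent ((lines.drop j).take (k + 1 - j))
            = (pvHasContent ((lines.drop j).take (k - j))
               || (!(PySem.Chars.strip line).isEmpty
                   && !(PySem.Chars.startswith (PySem.Chars.strip line) ['#']))) := by
          rw [hext]
          simp [pvHasContent]
        simp only [hs, Bool.true_and, hlast, hdl]
        rw [if_neg (by simp : ¬ ((gs' ++ [(lines.drop j).take (k - j)]).isEmpty = true))]
        cases hct : (!(PySem.Chars.strip line).isEmpty
            && !(PySem.Chars.startswith (PySem.Chars.strip line) ['#'])) with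
        | true =>
          rw [if_pos rfl]
          have hinv2 : pvInv lines (k+1) ((gs'.filter pvHasContent).flatMap id) cur true ((j : Nat) : Int)
              (gs' ++ [(lines.drop j).take (k - j) ++ [line]]) := by
            refine Or.inr ⟨j, gs', hs, rfl, by omega, ?_, rfl, ?_⟩
            · rw [hext]
            · rw [hcond, hct]
              simp
          exact IH (k+1) _ cur true _ _ hr' hinv2
        | false =>
          rw [if_neg (show ¬ (false = true) by simp)]
          have hinv2 : pvInv lines (k+1) ((gs'.filter pvHasContent).flatMap id) cur
              (pvHasContent ((lines.drop j).take (k - j))) ((j : Nat) : Int)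
              (gs' ++ [(lines.drop j).take (k - j) ++ [line]]) := by
            refine Or.inr ⟨j, gs', hs, rfl, by omega, ?_, rfl, ?_⟩
            · rw [hext]
            · rw [hcond, hct]
              simp
          exact IH (k+1) _ cur _ _ _ hr' hinv2

-- ===== VERDICT (by name: the statement is the Claim_ definition above) =====
theorem clean_changelog_sections_py_spec : Claim_equal_clean_changelog_sections_py := by
  intro changelog _
  unfold Spec_clean_changelog_sections_py clean_changelog_sections_py clean_changelog_sections_py_alt
  have h := pvMain (PySem.Chars.splitOn changelog.toList ['\n'])
    (PySem.Chars.splitOn changelog.toList ['\n']) 0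
    [] none false (-1) [] (by simp) (Or.inl ⟨rfl, rfl, rfl, rfl, rfl⟩)
  simp only [Int.natCast_zero] at h
  exact congrArg (fun c : List (List Char) =>
    if c.isEmpty && !(PySem.Chars.isIn "###".toList changelog.toList) then changelog
    else String.ofList (PySem.Chars.strip (PySem.Chars.join ['\n'] c))) h
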